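-- pv_equiv track=rewrite | github.com/munkherdn/dive_into_code | Sorochi.py | compute_sorori_shinzaemon
-- ===== SOURCE A (Python) =====
-- def compute_sorori_shinzaemon(n_days=100):
--
--     list_n_grains = []  # List to store the number of grains received each day
--     list_total_grains = []  # List to store the total number of grains received by a certain day
--     total_grains = 0  # Variable to keep track of the total number of grains
--
--     for day in range(1, n_days + 1):
--         grains_on_current_day = 2 ** (day - 1)
--         total_grains += grains_on_current_day
--
--         list_n_grains.append(grains_on_current_day)
--         list_total_grains.append(total_grains)
--
--     return list_n_grains, list_total_grains
-- ===== SOURCE B (Python) =====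
-- def compute_sorori_shinzaemon(n_days=100):
--     # Closed form: the cumulative total through a day is one less than twice
--     # that day's grains, so no running accumulator is needed.
--     list_n_grains = [2 ** i for i in range(n_days)]
--     return (list_n_grains, [2 * g - 1 for g in list_n_grains])
-- ===== Notes on version B (the rewrite author's own statement) =====
-- stated objective: simpler
-- what changed: Replaces the stateful loop carrying a running total with two comprehensions: the cumulative list is derived in closed form from the daily-grains list (one less than twice that day's grains), eliminating the accumulator.
import Mathlib
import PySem

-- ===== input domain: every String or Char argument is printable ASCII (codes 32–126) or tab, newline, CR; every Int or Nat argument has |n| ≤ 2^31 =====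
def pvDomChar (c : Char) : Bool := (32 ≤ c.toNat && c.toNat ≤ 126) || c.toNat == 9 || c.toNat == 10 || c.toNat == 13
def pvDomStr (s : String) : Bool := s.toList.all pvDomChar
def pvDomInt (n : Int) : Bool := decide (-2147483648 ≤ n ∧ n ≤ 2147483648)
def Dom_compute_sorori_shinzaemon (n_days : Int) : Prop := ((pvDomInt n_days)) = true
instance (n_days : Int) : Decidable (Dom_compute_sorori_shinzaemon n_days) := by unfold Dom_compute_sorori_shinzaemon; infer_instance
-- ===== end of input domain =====

-- B drops the running total: the cumulative list is built directly from the closed form 2^(i+1)-1.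

-- ===== PORT A =====
-- literal port of A's loop: state = (list_n_grains, list_total_grains, total_grains)
def compute_sorori_shinzaemon (n_days : Int) : List Int × List Int :=
  let s := (PySem.List.pyRange 1 (n_days + 1) 1).foldl
    (fun (st : List Int × List Int × Int) day =>
      let g := (2 : Int) ^ (day - 1).toNat
      let tot := st.2.2 + g
      (st.1 ++ [g], st.2.1 ++ [tot], tot))
    ([], [], 0)
  (s.1, s.2.1)

-- ===== PORT B =====
def compute_sorori_shinzaemon_alt (n_days : Int) : List Int × List Int :=
  let grains := (PySem.List.pyRange 0 n_days 1).map (fun i => (2 : Int) ^ i.toNat)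
  (grains, grains.map (fun g => 2 * g - 1))

-- ===== PRECONDITION & SPEC =====
def Spec_compute_sorori_shinzaemon (n_days : Int) (out : List Int × List Int) : Prop := out = compute_sorori_shinzaemon_alt n_days
instance (n_days : Int) (out : List Int × List Int) : Decidable (Spec_compute_sorori_shinzaemon n_days out) := by unfold Spec_compute_sorori_shinzaemon; infer_instance

-- ===== CLAIM (what is proved, stated in full; the proofs are below) =====
def Claim_equal_compute_sorori_shinzaemon : Prop := ∀ (n_days : Int), Dom_compute_sorori_shinzaemon n_days → Spec_compute_sorori_shinzaemon n_days (compute_sorori_shinzaemon n_days)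

-- ===== LEMMAS AND PROOFS =====

-- Invariant of A's fold over the first n days.
lemma sorori_fold_inv (n : ℕ) :
    (PySem.List.pyRange 1 ((n : Int) + 1) 1).foldl
      (fun (st : List Int × List Int × Int) day =>
        let g := (2 : Int) ^ (day - 1).toNat
        let tot := st.2.2 + g
        (st.1 ++ [g], st.2.1 ++ [tot], tot))
      ([], [], 0)
    = ((List.range n).map (fun i => (2 : Int) ^ i),
       (List.range n).map (fun i => (2 : Int) ^ (i + 1) - 1),
       (2 : Int) ^ n - 1) := by
  induction n with
  | zero => simp [PySem.List.pyRange_one_eq_nil]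
  | succ n ih =>
    have h : (((n : Int) + 1) + 1) = ((n : Int) + 1) + 1 := rfl
    have hsplit : PySem.List.pyRange 1 (((n + 1 : ℕ) : Int) + 1) 1
        = PySem.List.pyRange 1 ((n : Int) + 1) 1 ++ [(n : Int) + 1] := by
      push_cast
      exact PySem.List.pyRange_one_succ_right (by omega)
    rw [hsplit, List.foldl_append, ih]
    simp only [List.foldl_cons, List.foldl_nil]
    have htn : ((n : Int) + 1 - 1).toNat = n := by omega
    rw [htn]
    refine Prod.ext ?_ (Prod.ext ?_ ?_) <;> simp [List.range_succ, pow_succ] <;> ring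

lemma sorori_alt_eval (n : ℕ) :
    compute_sorori_shinzaemon_alt (n : Int)
    = ((List.range n).map (fun i => (2 : Int) ^ i),
       (List.range n).map (fun i => (2 : Int) ^ (i + 1) - 1)) := by
  unfold compute_sorori_shinzaemon_alt
  rw [PySem.List.pyRange_zero_nat]
  simp only [List.map_map]
  refine Prod.ext ?_ ?_ <;> simp [pow_succ] <;> intro a _ <;> ring

-- ===== VERDICT (by name: the statement is the Claim_ definition above) =====
theorem compute_sorori_shinzaemon_spec : Claim_equal_compute_sorori_shinzaemon := by
  intro n_days _
  unfold Spec_compute_sorori_shinzaemon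
  by_cases h : n_days ≤ 0
  · unfold compute_sorori_shinzaemon compute_sorori_shinzaemon_alt
    rw [PySem.List.pyRange_one_eq_nil (by omega), PySem.List.pyRange_one_eq_nil (by omega)]
    simp
  · obtain ⟨n, rfl⟩ : ∃ n : ℕ, n_days = (n : Int) := ⟨n_days.toNat, by omega⟩
    unfold compute_sorori_shinzaemon
    rw [sorori_fold_inv, sorori_alt_eval]
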